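-- pv_equiv track=rewrite | github.com/Rou7250/Code-Bug-Predictor | backend.py | _has_unterminated_quote
-- ===== SOURCE A (Python) =====
-- def _has_unterminated_quote(code: str) -> str:
--     single_count = 0
--     double_count = 0
--     escaped = False
--
--     for char in code:
--         if escaped:
--             escaped = False
--             continue
--         if char == "\\":
--             escaped = True
--             continue
--         if char == "'":
--             single_count += 1
--         elif char == '"':
--             double_count += 1
--
--     if single_count % 2 == 1 or double_count % 2 == 1:
--         return "Unterminated string literal detected"
--     return ""
-- ===== SOURCE B (Python) =====
-- import re
--
-- def _has_unterminated_quote(code: str) -> str: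
--     cleaned = re.sub(r'\\.', '', code, flags=re.DOTALL)
--     if cleaned.count("'") % 2 or cleaned.count('"') % 2:
--         return "Unterminated string literal detected"
--     return ""
-- ===== Notes on version B (the rewrite author's own statement) =====
-- stated objective: simpler
-- what changed: Replaces the char-by-char stateful scan (escaped flag, two counters) with a preprocess-then-count decomposition: one regex substitution strips each backslash plus the character it escapes, then quote parity is checked by counting.
import Mathlib
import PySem

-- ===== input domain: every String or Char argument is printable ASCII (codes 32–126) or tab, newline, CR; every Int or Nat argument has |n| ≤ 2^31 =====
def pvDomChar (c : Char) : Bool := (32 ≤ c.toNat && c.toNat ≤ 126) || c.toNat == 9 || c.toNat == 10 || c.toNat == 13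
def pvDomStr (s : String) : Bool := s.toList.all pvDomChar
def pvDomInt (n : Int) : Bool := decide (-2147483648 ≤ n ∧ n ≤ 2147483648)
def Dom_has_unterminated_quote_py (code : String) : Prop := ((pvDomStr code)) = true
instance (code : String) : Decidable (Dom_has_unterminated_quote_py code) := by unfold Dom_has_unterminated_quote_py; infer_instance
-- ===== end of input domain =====

-- B strips escape pairs in one left-to-right pass, then checks quote-count parity;
-- A keeps an 'escaped' flag in a single stateful scan. Equivalence of return values is proved.

-- ===== PORT A =====
-- the for-loop of A: state (single_count, double_count, escaped)
def huqLoopA : List Char → Int → Int → Bool → Int × Int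
  | [], s, d, _ => (s, d)
  | c :: rest, s, d, escaped =>
    if escaped then huqLoopA rest s d false
    else if c = '\\' then huqLoopA rest s d true
    else if c = '\'' then huqLoopA rest (s + 1) d false
    else if c = '"' then huqLoopA rest s (d + 1) false
    else huqLoopA rest s d false

def has_unterminated_quote_py (code : String) : String :=
  let r := huqLoopA code.toList 0 0 false
  if r.1 % 2 = 1 ∨ r.2 % 2 = 1 then "Unterminated string literal detected" else ""

-- ===== PORT B =====
-- port of re.sub(r'\\.', '', code, flags=re.DOTALL): remove each backslash together
-- with the character it escapes, non-overlapping, left to right (exact on all strings: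
-- '.' with DOTALL matches any character; a trailing lone backslash matches nothing and stays)
def huqStripEsc : List Char → List Char
  | [] => []
  | c :: rest =>
    if c = '\\' then
      match rest with
      | [] => [c]
      | _ :: t => huqStripEsc t
    else c :: huqStripEsc rest

def has_unterminated_quote_py_alt (code : String) : String :=
  let cleaned := huqStripEsc code.toList
  if cleaned.count '\'' % 2 ≠ 0 ∨ cleaned.count '"' % 2 ≠ 0 then
    "Unterminated string literal detected"
  else ""

-- ===== PRECONDITION & SPEC =====
def Spec_has_unterminated_quote_py (code : String) (out : String) : Prop := out = has_unterminated_quote_py_alt code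
instance (code : String) (out : String) : Decidable (Spec_has_unterminated_quote_py code out) := by unfold Spec_has_unterminated_quote_py; infer_instance

-- ===== CLAIM (what is proved, stated in full; the proofs are below) =====
def Claim_equal_has_unterminated_quote_py : Prop := ∀ (code : String), Dom_has_unterminated_quote_py code → Spec_has_unterminated_quote_py code (has_unterminated_quote_py code)

-- ===== LEMMAS AND PROOFS =====

-- A's loop starting unescaped counts exactly the quotes surviving escape-stripping
theorem huqLoopA_eq_strip : ∀ (l : List Char) (s d : Int),
    huqLoopA l s d false =
      (s + ((huqStripEsc l).count '\'' : Int), d + ((huqStripEsc l).count '"' : Int)) := by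
  have H : ∀ (n : Nat) (l : List Char), l.length ≤ n → ∀ (s d : Int),
      huqLoopA l s d false =
        (s + ((huqStripEsc l).count '\'' : Int), d + ((huqStripEsc l).count '"' : Int)) := by
    intro n
    induction n with
    | zero =>
      intro l hl s d
      have : l = [] := List.eq_nil_of_length_eq_zero (Nat.le_zero.mp hl)
      subst this; simp [huqLoopA, huqStripEsc]
    | succ n ih =>
      intro l hl s d
      match l with
      | [] => simp [huqLoopA, huqStripEsc]
      | c :: rest =>
        by_cases hb : c = '\\'
        · subst hb
          match rest with
          | [] => simp [huqLoopA, huqStripEsc, List.count_cons]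
          | c2 :: t =>
            have ht : t.length ≤ n := by simp at hl; omega
            simp only [huqLoopA, Bool.false_eq_true, if_false, if_pos rfl, huqStripEsc,
              if_true, ih t ht s d]
        · have hr : rest.length ≤ n := by simp at hl; omega
          have hs : huqStripEsc (c :: rest) = c :: huqStripEsc rest := by
            cases rest <;> simp [huqStripEsc, hb]
          by_cases h1 : c = '\''
          · subst h1
            simp [huqLoopA, hb, hs, ih rest hr, List.count_cons, Prod.ext_iff]
            omega
          · by_cases h2 : c = '"'
            · subst h2
              simp [huqLoopA, hb, h1, hs, ih rest hr, List.count_cons, Prod.ext_iff]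
              omega
            · simp [huqLoopA, hb, h1, h2, hs, ih rest hr, List.count_cons, Prod.ext_iff]
  intro l; exact H l.length l (Nat.le_refl _)

-- ===== VERDICT (by name: the statement is the Claim_ definition above) =====
theorem has_unterminated_quote_py_spec : Claim_equal_has_unterminated_quote_py := by
  intro code _
  show has_unterminated_quote_py code = has_unterminated_quote_py_alt code
  unfold has_unterminated_quote_py has_unterminated_quote_py_alt
  rw [huqLoopA_eq_strip]
  simp only [zero_add]
  congr 1
  rw [eq_iff_iff]
  constructor <;> intro h <;> rcases h with h | h
  · left; omega
  · right; omega
  · left; omega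
  · right; omega
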